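-- pv_equiv track=rewrite | github.com/kywalda/dsc_generator | dsc_functions.py | get_dis_ack_ecc
-- ===== SOURCE A (Python) =====
-- def get_dis_ack_ecc(f_s, c_s, s_s, tc1_s, a_s, d_s, p_s, u_s, su_s, e_s):
--
--     # if "All Ships", we ignore the a_mmsi word, it won't be transmitted, don't include it in the ECC
--     p_ecc = 0
--     for i in p_s:
--         p_ecc = int(i) ^ p_ecc
--
--     u_ecc = 0
--     for i in u_s:
--         u_ecc = int(i) ^ u_ecc
--
--
--     a_ecc = 0
--     for i in a_s:
--         a_ecc = int(i) ^ a_ecc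
--
--     s_ecc = 0
--     for i in s_s:
--         s_ecc = int(i) ^ s_ecc
--
--     ecc = f_s ^ c_s ^ s_ecc ^ tc1_s ^ a_ecc ^ d_s ^ p_ecc ^ u_ecc ^ su_s ^ e_s
--     return ecc
-- ===== SOURCE B (Python) =====
-- def get_dis_ack_ecc(f_s, c_s, s_s, tc1_s, a_s, d_s, p_s, u_s, su_s, e_s):
--     # Divide-and-conquer: XOR-reduce the combined value list as a balanced
--     # binary tree instead of running linear accumulator loops. Correct because
--     # XOR is associative and commutative, so any reduction order gives the
--     # same result.
--     def xor_tree(xs, lo, hi):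
--         if hi - lo == 1:
--             return int(xs[lo])
--         mid = (lo + hi) // 2
--         return xor_tree(xs, lo, mid) ^ xor_tree(xs, mid, hi)
--     vals = [f_s, c_s, d_s, tc1_s, su_s, e_s] + list(p_s) + list(u_s) + list(a_s) + list(s_s)
--     return xor_tree(vals, 0, len(vals))
-- ===== Notes on version B (the rewrite author's own statement) =====
-- stated objective: alternative
-- what changed: Replaces A's four sequential XOR accumulator loops plus a final scalar combine by a recursive divide-and-conquer reduction: all ten fields' values are gathered into one list and XOR-reduced as a balanced binary tree, valid because XOR is associative and commutative.
import Mathlib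
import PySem

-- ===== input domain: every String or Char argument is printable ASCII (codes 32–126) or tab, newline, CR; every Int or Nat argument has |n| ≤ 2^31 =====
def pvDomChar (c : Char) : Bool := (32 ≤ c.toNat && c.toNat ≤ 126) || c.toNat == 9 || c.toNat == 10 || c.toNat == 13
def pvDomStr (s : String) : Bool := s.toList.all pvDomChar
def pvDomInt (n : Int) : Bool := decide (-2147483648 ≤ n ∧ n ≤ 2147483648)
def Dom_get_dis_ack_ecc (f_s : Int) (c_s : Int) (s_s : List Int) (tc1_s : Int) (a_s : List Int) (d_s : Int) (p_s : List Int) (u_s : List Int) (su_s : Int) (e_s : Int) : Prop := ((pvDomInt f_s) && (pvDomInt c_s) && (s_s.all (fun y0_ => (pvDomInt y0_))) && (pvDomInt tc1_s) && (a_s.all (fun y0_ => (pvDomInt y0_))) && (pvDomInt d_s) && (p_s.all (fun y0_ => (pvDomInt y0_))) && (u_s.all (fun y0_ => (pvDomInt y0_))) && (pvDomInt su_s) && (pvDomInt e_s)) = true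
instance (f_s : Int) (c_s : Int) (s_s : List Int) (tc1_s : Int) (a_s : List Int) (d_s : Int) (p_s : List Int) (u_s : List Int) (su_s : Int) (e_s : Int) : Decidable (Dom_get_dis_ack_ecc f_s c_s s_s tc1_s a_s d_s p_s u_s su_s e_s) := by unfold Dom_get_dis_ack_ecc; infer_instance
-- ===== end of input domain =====

-- B replaces A's four sequential XOR accumulator loops (combined with the
-- scalars at the end) by a recursive divide-and-conquer XOR reduction over one
-- combined value list (objective: alternative; XOR is associative/commutative).

-- ===== PORT A =====
def get_dis_ack_ecc (f_s : Int) (c_s : Int) (s_s : List Int) (tc1_s : Int) (a_s : List Int) (d_s : Int) (p_s : List Int) (u_s : List Int) (su_s : Int) (e_s : Int) : Int :=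
  let p_ecc := p_s.foldl (fun p_ecc i => PySem.Int.bxor i p_ecc) 0
  let u_ecc := u_s.foldl (fun u_ecc i => PySem.Int.bxor i u_ecc) 0
  let a_ecc := a_s.foldl (fun a_ecc i => PySem.Int.bxor i a_ecc) 0
  let s_ecc := s_s.foldl (fun s_ecc i => PySem.Int.bxor i s_ecc) 0
  PySem.Int.bxor (PySem.Int.bxor (PySem.Int.bxor (PySem.Int.bxor (PySem.Int.bxor (PySem.Int.bxor (PySem.Int.bxor (PySem.Int.bxor (PySem.Int.bxor f_s c_s) s_ecc) tc1_s) a_ecc) d_s) p_ecc) u_ecc) su_s) e_s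

-- ===== PORT B =====
-- xor_tree from Source B; the base case is `hi - lo ≤ 1` instead of `== 1` purely
-- to make the recursion total (Python only ever calls it with lo < hi).
def pvXorTree (xs : List Int) (lo hi : Nat) : Int :=
  if hi - lo ≤ 1 then xs.getD lo 0
  else
    let mid := (lo + hi) / 2
    PySem.Int.bxor (pvXorTree xs lo mid) (pvXorTree xs mid hi)
termination_by hi - lo
decreasing_by all_goals omega

def get_dis_ack_ecc_alt (f_s : Int) (c_s : Int) (s_s : List Int) (tc1_s : Int) (a_s : List Int) (d_s : Int) (p_s : List Int) (u_s : List Int) (su_s : Int) (e_s : Int) : Int :=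
  let vals := [f_s, c_s, d_s, tc1_s, su_s, e_s] ++ p_s ++ u_s ++ a_s ++ s_s
  pvXorTree vals 0 vals.length

-- ===== PRECONDITION & SPEC =====
def Spec_get_dis_ack_ecc (f_s : Int) (c_s : Int) (s_s : List Int) (tc1_s : Int) (a_s : List Int) (d_s : Int) (p_s : List Int) (u_s : List Int) (su_s : Int) (e_s : Int) (out : Int) : Prop := out = get_dis_ack_ecc_alt f_s c_s s_s tc1_s a_s d_s p_s u_s su_s e_s
instance (f_s : Int) (c_s : Int) (s_s : List Int) (tc1_s : Int) (a_s : List Int) (d_s : Int) (p_s : List Int) (u_s : List Int) (su_s : Int) (e_s : Int) (out : Int) : Decidable (Spec_get_dis_ack_ecc f_s c_s s_s tc1_s a_s d_s p_s u_s su_s e_s out) := by unfold Spec_get_dis_ack_ecc; infer_instance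

-- ===== CLAIM (what is proved, stated in full; the proofs are below) =====
def Claim_equal_get_dis_ack_ecc : Prop := ∀ (f_s : Int) (c_s : Int) (s_s : List Int) (tc1_s : Int) (a_s : List Int) (d_s : Int) (p_s : List Int) (u_s : List Int) (su_s : Int) (e_s : Int), Dom_get_dis_ack_ecc f_s c_s s_s tc1_s a_s d_s p_s u_s su_s e_s → Spec_get_dis_ack_ecc f_s c_s s_s tc1_s a_s d_s p_s u_s su_s e_s (get_dis_ack_ecc f_s c_s s_s tc1_s a_s d_s p_s u_s su_s e_s)

-- ===== LEMMAS AND PROOFS =====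
theorem pv_bxor_eq_xor (a b : Int) : PySem.Int.bxor a b = Int.xor a b := by
  cases a <;> cases b <;> simp [PySem.Int.bxor, Int.xor, Int.negSucc_eq] <;> omega

theorem pv_bxor_assoc (a b c : Int) :
    PySem.Int.bxor (PySem.Int.bxor a b) c = PySem.Int.bxor a (PySem.Int.bxor b c) := by
  simp only [pv_bxor_eq_xor]
  cases a <;> cases b <;> cases c <;> simp [Int.xor, Nat.xor_assoc]

theorem pv_bxor_left_comm (a b c : Int) :
    PySem.Int.bxor a (PySem.Int.bxor b c) = PySem.Int.bxor b (PySem.Int.bxor a c) := by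
  rw [← pv_bxor_assoc, ← pv_bxor_assoc, PySem.Int.bxor_comm a b]

theorem pv_zero_bxor (a : Int) : PySem.Int.bxor 0 a = a := by
  rw [PySem.Int.bxor_comm]; exact PySem.Int.bxor_zero a

-- XOR of the segment xs[lo:hi], as a plain fold (proof-side characterisation)
def pvSegXor (xs : List Int) (lo hi : Nat) : Int :=
  ((xs.drop lo).take (hi - lo)).foldl (fun acc i => PySem.Int.bxor acc i) 0

theorem pv_fold_hoist (xs : List Int) (c : Int) :
    xs.foldl (fun acc i => PySem.Int.bxor acc i) c =
      PySem.Int.bxor c (xs.foldl (fun acc i => PySem.Int.bxor acc i) 0) := by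
  induction xs generalizing c with
  | nil => exact (PySem.Int.bxor_zero c).symm
  | cons x xs ih =>
    simp only [List.foldl_cons]
    rw [ih (PySem.Int.bxor c x), ih (PySem.Int.bxor 0 x), pv_zero_bxor, pv_bxor_assoc]

theorem pv_fold_append (xs ys : List Int) :
    (xs ++ ys).foldl (fun acc i => PySem.Int.bxor acc i) 0 =
      PySem.Int.bxor (xs.foldl (fun acc i => PySem.Int.bxor acc i) 0)
                     (ys.foldl (fun acc i => PySem.Int.bxor acc i) 0) := by
  rw [List.foldl_append, pv_fold_hoist]

theorem pv_segXor_split (xs : List Int) (lo mid hi : Nat)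
    (h1 : lo ≤ mid) (h2 : mid ≤ hi) :
    pvSegXor xs lo hi = PySem.Int.bxor (pvSegXor xs lo mid) (pvSegXor xs mid hi) := by
  unfold pvSegXor
  have hsum : hi - lo = (mid - lo) + (hi - mid) := by omega
  rw [hsum, List.take_add, pv_fold_append]
  have : lo + (mid - lo) = mid := by omega
  rw [List.drop_drop, this]

theorem pv_xorTree_eq_segXor (xs : List Int) (lo hi : Nat)
    (hlt : lo < hi) (hle : hi ≤ xs.length) :
    pvXorTree xs lo hi = pvSegXor xs lo hi := by
  by_cases hbase : hi - lo ≤ 1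
  · have hhi : hi = lo + 1 := by omega
    have hlo : lo < xs.length := by omega
    rw [pvXorTree, if_pos hbase]
    unfold pvSegXor
    rw [hhi]
    have : lo + 1 - lo = 1 := by omega
    rw [this, List.drop_eq_getElem_cons hlo, List.take_cons, List.take_zero]
    simp [List.getD, List.getElem?_eq_getElem hlo, pv_zero_bxor]
    omega
  · rw [pvXorTree, if_neg hbase]
    show PySem.Int.bxor (pvXorTree xs lo ((lo + hi) / 2)) (pvXorTree xs ((lo + hi) / 2) hi) = pvSegXor xs lo hi
    have h1 : lo < (lo + hi) / 2 := by omega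
    have h2 : (lo + hi) / 2 < hi := by omega
    rw [pv_xorTree_eq_segXor xs lo ((lo+hi)/2) h1 (by omega),
        pv_xorTree_eq_segXor xs ((lo+hi)/2) hi h2 hle,
        ← pv_segXor_split xs lo ((lo+hi)/2) hi (by omega) (by omega)]
termination_by hi - lo
decreasing_by all_goals omega

theorem pv_foldA_eq_foldB (xs : List Int) (c : Int) :
    xs.foldl (fun acc i => PySem.Int.bxor i acc) c =
      xs.foldl (fun acc i => PySem.Int.bxor acc i) c := by
  induction xs generalizing c with
  | nil => rfl
  | cons x xs ih => simp only [List.foldl_cons]; rw [PySem.Int.bxor_comm x c]; exact ih _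

-- ===== VERDICT (by name: the statement is the Claim_ definition above) =====
theorem get_dis_ack_ecc_spec : Claim_equal_get_dis_ack_ecc := by
  intro f_s c_s s_s tc1_s a_s d_s p_s u_s su_s e_s _
  unfold Spec_get_dis_ack_ecc get_dis_ack_ecc get_dis_ack_ecc_alt
  rw [pv_xorTree_eq_segXor _ 0 _ (by simp) (le_refl _)]
  unfold pvSegXor
  rw [List.drop_zero, Nat.sub_zero, List.take_length]
  simp only [List.append_assoc, pv_fold_append, List.foldl_cons, List.foldl_nil,
    pv_foldA_eq_foldB]
  rw [pv_fold_hoist s_s, pv_fold_hoist a_s, pv_fold_hoist u_s, pv_fold_hoist p_s,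
      pv_zero_bxor]
  generalize p_s.foldl (fun acc i => PySem.Int.bxor acc i) 0 = P
  generalize u_s.foldl (fun acc i => PySem.Int.bxor acc i) 0 = U
  generalize a_s.foldl (fun acc i => PySem.Int.bxor acc i) 0 = A
  generalize s_s.foldl (fun acc i => PySem.Int.bxor acc i) 0 = S
  simp only [pv_bxor_assoc, pv_zero_bxor]
  simp only [pv_bxor_left_comm, PySem.Int.bxor_comm]
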